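-- pv_equiv track=rewrite | github.com/aurorazl/math | Topology/子集问题.py | stringSubSet2
-- ===== SOURCE A (Python) =====
-- def stringSubSet2(s):
--     res = []
--     n = len(s)
--     def search(i, tmp):
--         res.append(tmp)
--         for j in range(i, n):
--             search(j + 1, tmp + s[j])
--     search(0, "")
--     return res
-- ===== SOURCE B (Python) =====
-- def stringSubSet2(s):
--     def sub(cs):
--         if not cs:
--             return [[]]
--         rest = sub(cs[1:])
--         return [[]] + [[cs[0]] + t for t in rest] + rest[1:]
--     return ["".join(t) for t in sub(list(s))]
-- ===== Notes on version B (the rewrite author's own statement) =====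
-- stated objective: alternative
-- what changed: Replaced the nested index-based DFS with a mutated result list by a pure structural recursion on the character list that builds the subset list of the tail and glues head-prefixed copies between the empty prefix and the tail's remainder, reproducing the preorder.
import Mathlib
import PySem

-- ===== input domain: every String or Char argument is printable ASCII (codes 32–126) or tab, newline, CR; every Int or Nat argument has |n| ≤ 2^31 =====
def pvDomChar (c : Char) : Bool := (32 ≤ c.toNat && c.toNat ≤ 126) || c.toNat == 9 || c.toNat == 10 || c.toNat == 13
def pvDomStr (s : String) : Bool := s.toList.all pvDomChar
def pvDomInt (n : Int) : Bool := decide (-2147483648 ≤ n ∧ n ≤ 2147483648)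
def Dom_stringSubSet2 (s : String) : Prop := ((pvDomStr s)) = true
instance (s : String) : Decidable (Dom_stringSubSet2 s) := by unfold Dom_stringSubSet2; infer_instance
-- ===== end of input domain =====

-- B replaces A's nested index-based DFS (shared res accumulator) by a pure structural
-- recursion over the character list; same output in the same preorder, similar cost.


-- ===== PORT A =====
-- A's inner `search(i, tmp)` only reads s[i:], so the index pair (s, i) is carried as
-- the suffix `cs`, and `tmp` as a List Char (res stores str(tmp)); the `for j in
-- range(i, n)` loop is the structural recursion `loopA` over that suffix (exact).
mutual
def searchA : List Char → List Char → List String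
  | cs, tmp => String.mk tmp :: loopA cs tmp
  termination_by cs _ => 2 * cs.length + 1
def loopA : List Char → List Char → List String
  | [], _ => []
  | c :: rest, tmp => searchA rest (tmp ++ [c]) ++ loopA rest tmp
  termination_by cs _ => 2 * cs.length
end

def stringSubSet2 (s : String) : List String := searchA s.toList []

-- ===== PORT B =====
-- Source B's `sub` over the char list, then "".join of each subset.
def subB : List Char → List (List Char)
  | [] => [[]]
  | c :: rest => [] :: ((subB rest).map (fun t => c :: t) ++ (subB rest).tail)

def stringSubSet2_alt (s : String) : List String := (subB s.toList).map String.mk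

-- ===== PRECONDITION & SPEC =====
def Spec_stringSubSet2 (s : String) (out : List String) : Prop := out = stringSubSet2_alt s
instance (s : String) (out : List String) : Decidable (Spec_stringSubSet2 s out) := by unfold Spec_stringSubSet2; infer_instance

-- ===== CLAIM (what is proved, stated in full; the proofs are below) =====
def Claim_equal_stringSubSet2 : Prop := ∀ (s : String), Dom_stringSubSet2 s → Spec_stringSubSet2 s (stringSubSet2 s)

-- ===== LEMMAS AND PROOFS =====
theorem searchA_eq (cs : List Char) : ∀ (tmp : List Char),
    searchA cs tmp = ((subB cs).map (fun t => tmp ++ t)).map String.mk ∧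
    loopA cs tmp = (((subB cs).tail).map (fun t => tmp ++ t)).map String.mk := by
  induction cs with
  | nil => intro tmp; simp [searchA, loopA, subB]
  | cons c rest ih =>
    intro tmp
    constructor
    · simp [searchA, subB, List.map_append, List.map_map, (ih tmp).2, (ih (tmp ++ [c])).1,
        searchA, loopA, Function.comp]
    · simp [loopA, subB, List.map_append, List.map_map, (ih tmp).2, (ih (tmp ++ [c])).1,
        Function.comp]

-- ===== VERDICT (by name: the statement is the Claim_ definition above) =====
theorem stringSubSet2_spec : Claim_equal_stringSubSet2 := by
  intro s _
  unfold Spec_stringSubSet2 stringSubSet2 stringSubSet2_alt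
  simpa using (searchA_eq s.toList []).1
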